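-- pv_equiv track=rewrite | github.com/Ibanevskiy/for-SINERGY | practic№3.py | sum_negatives_between_min_max
-- ===== SOURCE A (Python) =====
-- def sum_negatives_between_min_max(arr):
--     if not arr:
--         return 0  # Пустой массив
--
--     min_val = min(arr)
--     max_val = max(arr)
--     min_index = arr.index(min_val)
--     max_index = arr.index(max_val)
--
--     start = min(min_index, max_index)
--     end = max(min_index, max_index)
--
--     sum_neg = 0
--     for i in range(start + 1, end):
--         if arr[i] < 0:
--             sum_neg += arr[i]
--
--     return sum_neg
-- ===== SOURCE B (Python) =====
-- def sum_negatives_between_min_max(arr):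
--     if not arr:
--         return 0
--     lo = min(arr)
--     hi = max(arr)
--     total = 0
--     other = None
--     for x in arr:
--         if other is None:
--             if x == lo:
--                 other = hi
--             elif x == hi:
--                 other = lo
--         elif x == other:
--             return total
--         elif x < 0:
--             total += x
--     return total
-- ===== Notes on version B (the rewrite author's own statement) =====
-- stated objective: alternative
-- what changed: B computes no positions at all: instead of A's index/index/min-of-indices and a range loop, it runs a state machine over the list that starts accumulating negatives at the first occurrence of either extreme value and early-returns the total at the first occurrence of the other extreme.
import Mathlib
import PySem

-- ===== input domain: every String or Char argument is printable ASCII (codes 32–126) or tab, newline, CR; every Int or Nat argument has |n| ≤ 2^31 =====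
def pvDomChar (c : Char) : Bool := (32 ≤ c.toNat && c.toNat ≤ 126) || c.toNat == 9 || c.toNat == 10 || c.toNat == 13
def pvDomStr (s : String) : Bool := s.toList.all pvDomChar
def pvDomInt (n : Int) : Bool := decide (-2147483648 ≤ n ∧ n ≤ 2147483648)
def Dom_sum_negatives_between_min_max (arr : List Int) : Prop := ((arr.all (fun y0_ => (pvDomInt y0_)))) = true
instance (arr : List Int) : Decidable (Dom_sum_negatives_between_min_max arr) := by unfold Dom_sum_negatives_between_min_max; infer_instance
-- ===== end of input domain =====

-- B computes no positions at all: a state machine that starts accumulating negatives at the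
-- first occurrence of either extreme value and early-returns at the first occurrence of the
-- other extreme (objective: alternative algorithm, same asymptotic cost).

-- ===== PORT A =====
def sum_negatives_between_min_max (arr : List Int) : Int :=
  if arr = [] then 0
  else
    match PySem.List.min? arr id, PySem.List.max? arr id with
    | some min_val, some max_val =>
      match PySem.List.index? arr min_val, PySem.List.index? arr max_val with
      | some mi, some xi =>
        let min_index : Int := mi
        let max_index : Int := xi
        let start := min min_index max_index
        let stop := max min_index max_index
        (PySem.List.pyRange (start + 1) stop 1).foldl
          (fun s i =>
            if PySem.List.pyGetD arr i 0 < 0 then s + PySem.List.pyGetD arr i 0 else s) 0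
      | _, _ => 0  -- unreachable: min/max are members of arr
    | _, _ => 0    -- unreachable: arr ≠ []

-- ===== PORT B =====
-- the single for-loop of Source B: `other = None` phase, then accumulate until `other` is seen
def bLoop (lo hi : Int) (other : Option Int) (total : Int) : List Int → Int
  | [] => total
  | y :: t =>
    match other with
    | none =>
      if y = lo then bLoop lo hi (some hi) total t
      else if y = hi then bLoop lo hi (some lo) total t
      else bLoop lo hi none total t
    | some o =>
      if y = o then total
      else if y < 0 then bLoop lo hi (some o) (total + y) t
      else bLoop lo hi (some o) total t

def sum_negatives_between_min_max_alt (arr : List Int) : Int :=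
  if arr = [] then 0
  else
    match PySem.List.min? arr id with
    | none => 0  -- unreachable: arr ≠ []
    | some lo =>
      match PySem.List.max? arr id with
      | none => 0  -- unreachable: arr ≠ []
      | some hi => bLoop lo hi none 0 arr

-- ===== PRECONDITION & SPEC =====
def Spec_sum_negatives_between_min_max (arr : List Int) (out : Int) : Prop := out = sum_negatives_between_min_max_alt arr
instance (arr : List Int) (out : Int) : Decidable (Spec_sum_negatives_between_min_max arr out) := by unfold Spec_sum_negatives_between_min_max; infer_instance

-- ===== CLAIM (what is proved, stated in full; the proofs are below) =====
def Claim_equal_sum_negatives_between_min_max : Prop := ∀ (arr : List Int), Dom_sum_negatives_between_min_max arr → Spec_sum_negatives_between_min_max arr (sum_negatives_between_min_max arr)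

-- ===== LEMMAS AND PROOFS =====

-- phase 1 skips elements that are neither extreme
lemma bLoop_skip (lo hi total : Int) (u v : List Int)
    (h : ∀ y ∈ u, y ≠ lo ∧ y ≠ hi) :
    bLoop lo hi none total (u ++ v) = bLoop lo hi none total v := by
  induction u with
  | nil => rfl
  | cons a u ih =>
    have ha := h a (by simp)
    simp only [List.cons_append, bLoop, if_neg ha.1, if_neg ha.2]
    exact ih (fun y hy => h y (by simp [hy]))

-- phase 2 accumulates the negatives of w and stops at the first occurrence of o
lemma bLoop_found (lo hi o total : Int) (w z : List Int)
    (h : ∀ y ∈ w, y ≠ o) :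
    bLoop lo hi (some o) total (w ++ o :: z)
      = w.foldl (fun s y => if y < 0 then s + y else s) total := by
  induction w generalizing total with
  | nil => simp [bLoop]
  | cons a w ih =>
    have ha := h a (by simp)
    simp only [List.cons_append, bLoop, if_neg ha, List.foldl_cons]
    by_cases hneg : a < 0
    · rw [if_pos hneg, if_pos hneg]; exact ih _ (fun y hy => h y (by simp [hy]))
    · rw [if_neg hneg, if_neg hneg]; exact ih _ (fun y hy => h y (by simp [hy]))

-- phase 2 on a constant list returns the total immediately (or at the end)
lemma bLoop_all_eq (lo hi m total : Int) (v : List Int)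
    (h : ∀ y ∈ v, y = m) :
    bLoop lo hi (some m) total v = total := by
  cases v with
  | nil => rfl
  | cons a t => simp [bLoop, h a (by simp)]

-- the whole B loop, given the decomposition at the two first extreme occurrences
lemma bLoop_eval (lo hi e o : Int) (p w z : List Int)
    (hp : ∀ y ∈ p, y ≠ lo ∧ y ≠ hi)
    (hw : ∀ y ∈ w, y ≠ o)
    (he : (e = lo ∧ o = hi) ∨ (e ≠ lo ∧ e = hi ∧ o = lo)) :
    bLoop lo hi none 0 (p ++ e :: (w ++ o :: z))
      = w.foldl (fun s y => if y < 0 then s + y else s) 0 := by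
  rw [bLoop_skip lo hi 0 p _ hp]
  rcases he with ⟨h1, h2⟩ | ⟨h1, h2, h3⟩
  · simp only [bLoop, if_pos h1]
    rw [← h2]
    exact bLoop_found lo o o 0 w z hw
  · simp only [bLoop, if_neg h1, if_pos h2]
    rw [← h3]
    exact bLoop_found o hi o 0 w z hw

-- A's index loop over range(a, b) equals a fold over the corresponding sublist
lemma foldRange_eq (arr : List Int) (a b init : Int)
    (h0 : 0 ≤ a) (hb : b ≤ arr.length) :
    (PySem.List.pyRange a b 1).foldl
      (fun s i => if PySem.List.pyGetD arr i 0 < 0 then s + PySem.List.pyGetD arr i 0 else s) init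
    = ((arr.drop a.toNat).take (b - a).toNat).foldl
        (fun s y => if y < 0 then s + y else s) init := by
  generalize hn : (b - a).toNat = n
  induction n generalizing a init with
  | zero =>
    rw [PySem.List.pyRange_one_eq_nil (by omega)]
    rfl
  | succ n ih =>
    have hab : a < b := by omega
    have halen : a.toNat < arr.length := by omega
    rw [PySem.List.pyRange_one_cons hab]
    simp only [List.foldl_cons]
    rw [List.drop_eq_getElem_cons halen, List.take_succ_cons, List.foldl_cons]
    rw [PySem.List.pyGetD_eq_getElem arr 0 h0 (by omega)]
    have h1 : (a + 1).toNat = a.toNat + 1 := by omega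
    have := ih (a + 1) (if arr[a.toNat] < 0 then init + arr[a.toNat] else init) (by omega) (by omega)
    rw [h1] at this
    exact this

-- ===== VERDICT (by name: the statement is the Claim_ definition above) =====
theorem sum_negatives_between_min_max_spec : Claim_equal_sum_negatives_between_min_max := by
  intro arr _
  unfold Spec_sum_negatives_between_min_max
  by_cases harr : arr = []
  · subst harr; rfl
  obtain ⟨m, hm⟩ : ∃ m, PySem.List.min? arr id = some m := by
    cases h : PySem.List.min? arr id with
    | none => exact absurd ((PySem.List.min?_eq_none_iff arr id).mp h) harr
    | some m => exact ⟨m, rfl⟩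
  obtain ⟨x, hx⟩ : ∃ x, PySem.List.max? arr id = some x := by
    cases h : PySem.List.max? arr id with
    | none => exact absurd ((PySem.List.max?_eq_none_iff arr id).mp h) harr
    | some x => exact ⟨x, rfl⟩
  obtain ⟨mi, hmi⟩ : ∃ mi, PySem.List.index? arr m = some mi := by
    have := PySem.List.index?_isSome_iff (xs := arr) (v := m) |>.mpr (PySem.List.min?_mem hm)
    exact Option.isSome_iff_exists.mp this
  obtain ⟨xi, hxi⟩ : ∃ xi, PySem.List.index? arr x = some xi := by
    have := PySem.List.index?_isSome_iff (xs := arr) (v := x) |>.mpr (PySem.List.max?_mem hx)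
    exact Option.isSome_iff_exists.mp this
  obtain ⟨p, s1, hparr, hplen, hpm⟩ := (PySem.List.index?_eq_some_iff arr m mi).mp hmi
  obtain ⟨q, s2, hqarr, hqlen, hqx⟩ := (PySem.List.index?_eq_some_iff arr x xi).mp hxi
  unfold sum_negatives_between_min_max sum_negatives_between_min_max_alt
  rw [if_neg harr, if_neg harr, hm, hx]
  dsimp only
  rw [hmi, hxi]
  dsimp only
  have htakep : arr.take mi = p := by rw [hparr, ← hplen]; exact List.take_left
  have htakeq : arr.take xi = q := by rw [hqarr, ← hqlen]; exact List.take_left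
  have hdropp : arr.drop (mi + 1) = s1 := by
    rw [hparr, List.append_cons]
    have hlen1 : (p ++ [m]).length = mi + 1 := by simp [hplen]
    rw [← hlen1]; exact List.drop_left
  have hdropq : arr.drop (xi + 1) = s2 := by
    rw [hqarr, List.append_cons]
    have hlen1 : (q ++ [x]).length = xi + 1 := by simp [hqlen]
    rw [← hlen1]; exact List.drop_left
  have hlenp : arr.length = mi + 1 + s1.length := by rw [hparr]; simp [hplen]; omega
  have hlenq : arr.length = xi + 1 + s2.length := by rw [hqarr]; simp [hqlen]; omega
  rcases Nat.lt_trichotomy mi xi with hlt | heq | hgt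
  · -- first min before first max
    have hs1 : s1 = q.drop (mi + 1) ++ x :: s2 := by
      rw [← hdropp, hqarr, List.drop_append]
      have h0 : mi + 1 - q.length = 0 := by omega
      rw [h0, List.drop_zero]
    have hwlen : (q.drop (mi + 1)).length = xi - (mi + 1) := by simp [hqlen]
    have hwx : ∀ y ∈ q.drop (mi + 1), y ≠ x := fun y hy hc =>
      hqx (hc ▸ List.mem_of_mem_drop hy)
    have hp' : ∀ y ∈ p, y ≠ m ∧ y ≠ x := by
      intro y hy
      refine ⟨fun hc => hpm (hc ▸ hy), fun hc => hqx (hc ▸ ?_)⟩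
      have hpq : p = q.take mi := by
        rw [← htakeq, List.take_take, Nat.min_eq_left hlt.le, htakep]
      exact List.mem_of_mem_take (hpq ▸ hy)
    have hB : bLoop m x none 0 arr
        = (q.drop (mi + 1)).foldl (fun s y => if y < 0 then s + y else s) 0 := by
      rw [hparr, hs1]
      exact bLoop_eval m x m x p (q.drop (mi + 1)) s2 hp' hwx (Or.inl ⟨rfl, rfl⟩)
    rw [hB]
    have hmin : min ((mi : Int)) ((xi : Int)) = (mi : Int) := by omega
    have hmax : max ((mi : Int)) ((xi : Int)) = (xi : Int) := by omega
    rw [hmin, hmax,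
      foldRange_eq arr ((mi : Int) + 1) (xi : Int) 0 (by omega) (by omega)]
    have h1 : ((mi : Int) + 1).toNat = mi + 1 := by omega
    have h2 : ((xi : Int) - ((mi : Int) + 1)).toNat = xi - (mi + 1) := by omega
    rw [h1, h2, hdropp, hs1, ← hwlen, List.take_left]
  · -- the two first occurrences coincide: min = max, constant array
    have happ := hparr.symm.trans hqarr
    have hmx : m = x := by
      have h2 := (List.append_inj happ (by omega)).2
      exact (List.cons.injEq _ _ _ _ ▸ h2).1
    have hall : ∀ y ∈ arr, y = m := fun y hy =>
      le_antisymm (hmx ▸ PySem.List.max?_isMax hx y hy) (PySem.List.min?_isMin hm y hy)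
    have hpnil : p = [] := by
      rcases p with _ | ⟨a, p'⟩
      · rfl
      · exact absurd (hall a (by rw [hparr]; simp)) (fun hc => hpm (by simp [hc]))
    have hstep : bLoop m x none 0 (m :: s1) = bLoop m x (some x) 0 s1 := by
      simp [bLoop]
    have hB : bLoop m x none 0 arr = 0 := by
      rw [hparr, hpnil, List.nil_append, hstep]
      exact bLoop_all_eq m x x 0 s1
        (fun y hy => (hall y (by rw [hparr, hpnil]; simp [hy])).trans hmx)
    rw [hB, heq]
    rw [PySem.List.pyRange_one_eq_nil (by omega)]
    rfl
  · -- first max before first min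
    have hxm : x ≠ m := by
      intro hc
      rw [hc, hmi] at hxi
      have := Option.some.inj hxi
      omega
    have hs2 : s2 = p.drop (xi + 1) ++ m :: s1 := by
      rw [← hdropq, hparr, List.drop_append]
      have h0 : xi + 1 - p.length = 0 := by omega
      rw [h0, List.drop_zero]
    have hwlen : (p.drop (xi + 1)).length = mi - (xi + 1) := by simp [hplen]
    have hwm : ∀ y ∈ p.drop (xi + 1), y ≠ m := fun y hy hc =>
      hpm (hc ▸ List.mem_of_mem_drop hy)
    have hq' : ∀ y ∈ q, y ≠ m ∧ y ≠ x := by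
      intro y hy
      refine ⟨fun hc => hpm (hc ▸ ?_), fun hc => hqx (hc ▸ hy)⟩
      have hqp : q = p.take xi := by
        rw [← htakep, List.take_take, Nat.min_eq_left hgt.le, htakeq]
      exact List.mem_of_mem_take (hqp ▸ hy)
    have hB : bLoop m x none 0 arr
        = (p.drop (xi + 1)).foldl (fun s y => if y < 0 then s + y else s) 0 := by
      rw [hqarr, hs2]
      exact bLoop_eval m x x m q (p.drop (xi + 1)) s1 hq' hwm (Or.inr ⟨hxm, rfl, rfl⟩)
    rw [hB]
    have hmin : min ((mi : Int)) ((xi : Int)) = (xi : Int) := by omega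
    have hmax : max ((mi : Int)) ((xi : Int)) = (mi : Int) := by omega
    rw [hmin, hmax,
      foldRange_eq arr ((xi : Int) + 1) (mi : Int) 0 (by omega) (by omega)]
    have h1 : ((xi : Int) + 1).toNat = xi + 1 := by omega
    have h2 : ((mi : Int) - ((xi : Int) + 1)).toNat = mi - (xi + 1) := by omega
    rw [h1, h2, hdropq, hs2, ← hwlen, List.take_left]
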